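-- pv_equiv track=rewrite | github.com/Benjamin-van-Heerden/Python | google_foobar/level5/try_again_five.py | gcd_table
-- ===== SOURCE A (Python) =====
-- def gcd_table(n):
--     """
--     builds a table of gcd's for all (i, j) with i, j <= n
--
--     :param n:
--     :return: table of gcd's
--     """
--     table = [[0 for _ in range(n)] for __ in range(n)]
--
--     for i in range(n):
--         for j in range(i, n):
--             if i == 0 or j == 0:
--                 table[i][j] = 1
--                 table[j][i] = 1
--             elif i == j:
--                 table[i][j] = i + 1
--             else:
--                 table[i][j] = table[i][j - i - 1]
--                 table[j][i] = table[i][j - i - 1]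
--     return table
-- ===== SOURCE B (Python) =====
-- def gcd_table(n):
--     def gcd(a, b):
--         while b:
--             a, b = b, a % b
--         return a
--     return [[gcd(i + 1, j + 1) for j in range(n)] for i in range(n)]
-- ===== Notes on version B (the rewrite author's own statement) =====
-- stated objective: simpler
-- what changed: A fills the table by dynamic programming, each cell copying an earlier cell selected by a subtraction recurrence plus symmetric writes; B maintains no table of prior results and computes every cell independently with a direct Euclidean gcd.
import Mathlib
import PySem

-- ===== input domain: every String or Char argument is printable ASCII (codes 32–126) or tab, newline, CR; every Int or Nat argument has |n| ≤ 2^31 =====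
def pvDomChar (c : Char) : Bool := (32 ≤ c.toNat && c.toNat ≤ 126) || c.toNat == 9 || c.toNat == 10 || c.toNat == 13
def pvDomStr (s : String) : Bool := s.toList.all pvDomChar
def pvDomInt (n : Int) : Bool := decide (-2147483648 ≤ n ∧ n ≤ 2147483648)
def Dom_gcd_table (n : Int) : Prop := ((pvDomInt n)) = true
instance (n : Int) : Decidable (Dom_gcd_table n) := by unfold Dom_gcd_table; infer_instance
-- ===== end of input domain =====

-- B replaces A's dynamic-programming table (cells read earlier cells via a subtraction
-- recurrence) with a direct per-cell Euclidean gcd; objective: simpler.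


-- ===== PORT A =====
-- table[a][b] read / write; all indices A uses are nonnegative and in range, so Nat
-- indexing with getD/set is exact here (Python range(n) = List.range n.toNat).
def pvGet2 (t : List (List Int)) (a b : Nat) : Int := (t.getD a []).getD b 0
def pvSet2 (t : List (List Int)) (a b : Nat) (v : Int) : List (List Int) :=
  t.set a ((t.getD a []).set b v)
-- one inner-loop body of A, at indices (i, j)
def pvStep (i j : Nat) (t : List (List Int)) : List (List Int) :=
  if i = 0 ∨ j = 0 then
    pvSet2 (pvSet2 t i j 1) j i 1
  else if i = j then
    pvSet2 t i j ((i : Int) + 1)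
  else
    -- table[i][j] = table[i][j-i-1]; table[j][i] = table[i][j-i-1] (re-read after write)
    let t1 := pvSet2 t i j (pvGet2 t i (j - i - 1))
    pvSet2 t1 j i (pvGet2 t1 i (j - i - 1))

def gcd_table (n : Int) : List (List Int) :=
  let N := n.toNat
  let table := (List.range N).map (fun _ => (List.range N).map (fun _ => (0 : Int)))
  (List.range N).foldl
    (fun t i => (List.range' i (N - i)).foldl (fun t j => pvStep i j t) t) table

-- ===== PORT B =====
-- Source B's inner helper: while b: a, b = b, a % b; return a  (arguments are positive)
def pvGcd (a b : Nat) : Nat :=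
  if b = 0 then a else pvGcd b (a % b)
decreasing_by exact Nat.mod_lt _ (Nat.pos_of_ne_zero (by assumption))

def gcd_table_alt (n : Int) : List (List Int) :=
  (List.range n.toNat).map (fun i =>
    (List.range n.toNat).map (fun j => (pvGcd (i + 1) (j + 1) : Int)))

-- ===== PRECONDITION & SPEC =====
def Spec_gcd_table (n : Int) (out : List (List Int)) : Prop := out = gcd_table_alt n
instance (n : Int) (out : List (List Int)) : Decidable (Spec_gcd_table n out) := by unfold Spec_gcd_table; infer_instance

-- ===== CLAIM (what is proved, stated in full; the proofs are below) =====
def Claim_equal_gcd_table : Prop := ∀ (n : Int), Dom_gcd_table n → Spec_gcd_table n (gcd_table n)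

-- ===== LEMMAS AND PROOFS =====

theorem pvGcd_eq (a b : Nat) : pvGcd a b = Nat.gcd a b := by
  induction b using Nat.strong_induction_on generalizing a with
  | _ b ih =>
    rw [pvGcd]
    by_cases hb : b = 0
    · simp [hb]
    · simp only [hb, if_false]
      rw [ih (a % b) (Nat.mod_lt _ (Nat.pos_of_ne_zero hb))]
      rw [Nat.gcd_comm a b, Nat.gcd_rec b a]
      exact (Nat.gcd_comm _ _)

-- target cell value
def pvG (a b : Nat) : Int := (Nat.gcd (a + 1) (b + 1) : Int)

-- which cells are already filled after outer iteration i reached inner index j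
def pvFilled (i j a b : Nat) : Bool :=
  decide (min a b < i ∨ (min a b = i ∧ max a b < j))

def pvInv (N i j : Nat) (t : List (List Int)) : Prop :=
  t.length = N ∧ (∀ a, a < N → (t.getD a []).length = N) ∧
  (∀ a b, a < N → b < N → pvGet2 t a b = if pvFilled i j a b then pvG a b else 0)

theorem pvGetD_set (t : List (List Int)) (a : Nat) (r : List Int) (c : Nat) :
    (t.set a r).getD c ([] : List Int) =
      if a = c ∧ a < t.length then r else t.getD c [] := by
  rw [List.getD_eq_getElem?_getD, List.getElem?_set]
  by_cases h : a = c
  · subst h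
    by_cases hl : a < t.length
    · simp [hl]
    · simp [hl, List.getD_eq_getElem?_getD]
  · simp [h, List.getD_eq_getElem?_getD]

theorem pvGetDI_set (r : List Int) (b : Nat) (v : Int) (d : Nat) :
    (r.set b v).getD d (0 : Int) =
      if b = d ∧ b < r.length then v else r.getD d 0 := by
  rw [List.getD_eq_getElem?_getD, List.getElem?_set]
  by_cases h : b = d
  · subst h
    by_cases hl : b < r.length
    · simp [hl]
    · simp [hl, List.getD_eq_getElem?_getD]
  · simp [h, List.getD_eq_getElem?_getD]

theorem pvSet2_length (t : List (List Int)) (a b : Nat) (v : Int) :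
    (pvSet2 t a b v).length = t.length := by simp [pvSet2]

theorem pvSet2_row_length (t : List (List Int)) (a b : Nat) (v : Int) (c : Nat) :
    ((pvSet2 t a b v).getD c []).length = (t.getD c []).length := by
  unfold pvSet2
  rw [pvGetD_set]
  split_ifs with h
  · obtain ⟨rfl, _⟩ := h
    simp
  · rfl

theorem pvGet2_set2_same (t : List (List Int)) (a b : Nat) (v : Int)
    (ha : a < t.length) (hb : b < (t.getD a []).length) :
    pvGet2 (pvSet2 t a b v) a b = v := by
  unfold pvGet2 pvSet2
  rw [pvGetD_set, if_pos ⟨rfl, ha⟩, pvGetDI_set, if_pos ⟨rfl, hb⟩]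

theorem pvGet2_set2_other (t : List (List Int)) (a b : Nat) (v : Int) (c d : Nat)
    (h : ¬(c = a ∧ d = b)) :
    pvGet2 (pvSet2 t a b v) c d = pvGet2 t c d := by
  unfold pvGet2 pvSet2
  rw [pvGetD_set]
  split_ifs with hc
  · obtain ⟨rfl, _⟩ := hc
    rw [pvGetDI_set]
    have hd : ¬(b = d ∧ b < (t.getD a []).length) := by
      intro hh
      exact h ⟨rfl, hh.1.symm⟩
    rw [if_neg hd]
  · rfl

-- the recurrence is correct: for 0 < i < j, gcd(i+1, j-i) = gcd(i+1, j+1)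
theorem pvG_rec (i j : Nat) (hij : i < j) : pvG i (j - i - 1) = pvG i j := by
  unfold pvG
  congr 1
  have h1 : (j - i - 1) + 1 = j - i := by omega
  rw [h1]
  have h2 : j + 1 = (j - i) + (i + 1) := by omega
  rw [h2, Nat.gcd_add_self_right]

theorem pvG_comm (a b : Nat) : pvG a b = pvG b a := by
  unfold pvG; rw [Nat.gcd_comm]

theorem pvStep_inv (N i j : Nat) (t : List (List Int))
    (hij : i ≤ j) (hjN : j < N) (ht : pvInv N i j t) :
    pvInv N i (j + 1) (pvStep i j t) := by
  obtain ⟨hlen, hrow, hval⟩ := ht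
  refine ⟨?_, ?_, ?_⟩
  · simp only [pvStep]; split_ifs <;> simp only [pvSet2_length] <;> exact hlen
  · intro a ha; simp only [pvStep]; split_ifs <;> simp only [pvSet2_row_length] <;>
      exact hrow a ha
  · intro a b haN hbN
    simp only [pvStep]
    by_cases h1 : i = 0 ∨ j = 0
    · rw [if_pos h1]
      have hgij : pvG i j = 1 := by
        rcases h1 with h | h <;>
          simp [pvG, h, Nat.gcd_one_left, Nat.gcd_one_right]
      by_cases hab : a = j ∧ b = i
      · obtain ⟨rfl, rfl⟩ := hab
        rw [pvGet2_set2_same]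
        · have hf : pvFilled b (a + 1) a b = true := by simp [pvFilled] <;> omega
          rw [hf, if_pos rfl, pvG_comm a b, hgij]
        · rw [pvSet2_length, hlen]; exact haN
        · rw [pvSet2_row_length, hrow a haN]; exact hbN
      · rw [pvGet2_set2_other _ _ _ _ _ _ hab]
        by_cases hab2 : a = i ∧ b = j
        · obtain ⟨rfl, rfl⟩ := hab2
          rw [pvGet2_set2_same]
          · have hf : pvFilled a (b + 1) a b = true := by simp [pvFilled] <;> omega
            rw [hf, if_pos rfl, hgij]
          · rw [hlen]; exact haN
          · rw [hrow a haN]; exact hbN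
        · rw [pvGet2_set2_other _ _ _ _ _ _ hab2, hval a b haN hbN]
          have hc : pvFilled i j a b = pvFilled i (j + 1) a b := by
            simp only [pvFilled, decide_eq_decide]
            constructor <;> intro hh <;> omega
          rw [hc]
    · rw [if_neg h1]
      by_cases h2 : i = j
      · rw [if_pos h2]
        subst h2
        by_cases hab : a = i ∧ b = i
        · obtain ⟨rfl, rfl⟩ := hab
          rw [pvGet2_set2_same]
          · have hf : pvFilled b (b + 1) b b = true := by simp [pvFilled] <;> omega
            rw [hf, if_pos rfl]; simp [pvG, Nat.gcd_self]
          · rw [hlen]; exact hbN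
          · rw [hrow b hbN]; exact hbN
        · rw [pvGet2_set2_other _ _ _ _ _ _ hab, hval a b haN hbN]
          have hc : pvFilled i i a b = pvFilled i (i + 1) a b := by
            simp only [pvFilled, decide_eq_decide]
            constructor <;> intro hh <;> omega
          rw [hc]
      · rw [if_neg h2]
        have hij' : i < j := lt_of_le_of_ne hij h2
        have hiN : i < N := by omega
        have hk : j - i - 1 < N := by omega
        have hfk : pvFilled i j i (j - i - 1) = true := by simp [pvFilled] <;> omega
        have hv : pvGet2 t i (j - i - 1) = pvG i j := by
          rw [hval i (j - i - 1) hiN hk, hfk, if_pos rfl, pvG_rec i j hij']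
        have hv2 : pvGet2 (pvSet2 t i j (pvGet2 t i (j - i - 1))) i (j - i - 1)
            = pvG i j := by
          rw [pvGet2_set2_other _ _ _ _ _ _ (by omega : ¬(i = i ∧ j - i - 1 = j)), hv]
        by_cases hab : a = j ∧ b = i
        · obtain ⟨rfl, rfl⟩ := hab
          rw [pvGet2_set2_same]
          · rw [hv2]
            have hf : pvFilled b (a + 1) a b = true := by simp [pvFilled] <;> omega
            rw [hf, if_pos rfl, pvG_comm a b]
          · rw [pvSet2_length, hlen]; exact haN
          · rw [pvSet2_row_length, hrow a haN]; exact hbN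
        · rw [pvGet2_set2_other _ _ _ _ _ _ hab]
          by_cases hab2 : a = i ∧ b = j
          · obtain ⟨rfl, rfl⟩ := hab2
            rw [pvGet2_set2_same]
            · rw [hv]
              have hf : pvFilled a (b + 1) a b = true := by simp [pvFilled] <;> omega
              rw [hf, if_pos rfl]
            · rw [hlen]; exact haN
            · rw [hrow a haN]; exact hbN
          · rw [pvGet2_set2_other _ _ _ _ _ _ hab2, hval a b haN hbN]
            have hc : pvFilled i j a b = pvFilled i (j + 1) a b := by
              simp only [pvFilled, decide_eq_decide]
              constructor <;> intro hh <;> omega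
            rw [hc]

theorem pvInner_inv (N i : Nat) (hiN : i < N) :
    ∀ (m j : Nat) (t : List (List Int)), i ≤ j → j + m ≤ N → pvInv N i j t →
      pvInv N i (j + m) ((List.range' j m).foldl (fun t j => pvStep i j t) t) := by
  intro m
  induction m with
  | zero => intro j t _ _ ht; simpa using ht
  | succ m ih =>
    intro j t hij hjm ht
    rw [List.range'_succ, List.foldl_cons]
    have h1 := pvStep_inv N i j t hij (by omega) ht
    have := ih (j + 1) (pvStep i j t) (by omega) (by omega) h1
    simpa [Nat.add_comm, Nat.add_left_comm] using this

theorem pvFilled_shift (N i a b : Nat) (ha : a < N) (hb : b < N) :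
    pvFilled i N a b = pvFilled (i + 1) (i + 1) a b := by
  simp only [pvFilled, decide_eq_decide]
  omega

theorem pvInv_shift (N i : Nat) (t : List (List Int)) (ht : pvInv N i N t) :
    pvInv N (i + 1) (i + 1) t := by
  obtain ⟨h1, h2, h3⟩ := ht
  refine ⟨h1, h2, fun a b ha hb => ?_⟩
  rw [h3 a b ha hb, pvFilled_shift N i a b ha hb]

theorem pvOuter_inv (N : Nat) :
    ∀ (m i : Nat) (t : List (List Int)), i + m ≤ N → pvInv N i i t →
      pvInv N (i + m) (i + m)
        ((List.range' i m).foldl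
          (fun t i => (List.range' i (N - i)).foldl (fun t j => pvStep i j t) t) t) := by
  intro m
  induction m with
  | zero => intro i t _ ht; simpa using ht
  | succ m ih =>
    intro i t him ht
    rw [List.range'_succ, List.foldl_cons]
    have hiN : i < N := by omega
    have h1 := pvInner_inv N i hiN (N - i) i t (le_refl i) (by omega) ht
    rw [(by omega : i + (N - i) = N)] at h1
    have h2 := pvInv_shift N i _ h1
    have := ih (i + 1) _ (by omega) h2
    simpa [Nat.add_comm, Nat.add_left_comm] using this

theorem pvInv_init (N : Nat) :
    pvInv N 0 0 ((List.range N).map (fun _ => (List.range N).map (fun _ => (0 : Int)))) := by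
  refine ⟨by simp, fun a ha => ?_, fun a b ha hb => ?_⟩
  · simp [List.getD_eq_getElem?_getD, ha]
  · simp [pvGet2, pvFilled, List.getD_eq_getElem?_getD, ha, hb]

theorem pvInv_final_eq (N : Nat) (t : List (List Int)) (ht : pvInv N N N t) :
    t = (List.range N).map (fun a => (List.range N).map (fun b => pvG a b)) := by
  obtain ⟨h1, h2, h3⟩ := ht
  apply List.ext_getElem (by simp [h1])
  intro a ha ha'
  have haN : a < N := h1 ▸ ha
  have hrowa : t.getD a [] = t[a] := by
    rw [List.getD_eq_getElem?_getD, List.getElem?_eq_getElem ha]; rfl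
  simp only [List.getElem_map, List.getElem_range]
  apply List.ext_getElem
  · simp only [List.length_map, List.length_range]
    rw [← hrowa]; exact h2 a haN
  · intro b hb hb'
    have hbN : b < N := by
      rw [← hrowa] at hb; rw [h2 a haN] at hb; exact hb
    simp only [List.getElem_map, List.getElem_range]
    have hval := h3 a b haN hbN
    unfold pvGet2 at hval
    rw [hrowa] at hval
    have hc : (t[a]).getD b 0 = t[a][b] := by
      rw [List.getD_eq_getElem?_getD, List.getElem?_eq_getElem hb]; rfl
    rw [hc] at hval
    rw [hval]
    have hf : pvFilled N N a b = true := by simp [pvFilled] <;> omega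
    rw [hf, if_pos rfl]

-- ===== VERDICT (by name: the statement is the Claim_ definition above) =====
theorem gcd_table_spec : Claim_equal_gcd_table := by
  intro n _
  unfold Spec_gcd_table
  have hinit := pvInv_init n.toNat
  have hfin := pvOuter_inv n.toNat n.toNat 0 _ (by omega) hinit
  rw [← List.range_eq_range', Nat.zero_add] at hfin
  have hA : gcd_table n
      = (List.range n.toNat).map (fun a => (List.range n.toNat).map (fun b => pvG a b)) := by
    unfold gcd_table
    exact pvInv_final_eq n.toNat _ hfin
  rw [hA]
  unfold gcd_table_alt
  apply List.map_congr_left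
  intro a _
  apply List.map_congr_left
  intro b _
  rw [pvGcd_eq, pvG]
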